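-- pv_equiv track=rewrite | github.com/NihalSayyad/DSA | 02.Strings/07.SameFormatString.py | solve
-- ===== SOURCE A (Python) =====
-- def solve(A, B):
--     i = 0
--     j = 0
--     len_A = len(A)
--     len_B = len(B)
--
--     if A[i] != B[j]:
--         return 0
--
--     for j in range(1, len_B):
--         if B[j] != B[j-1]:
--             i += 1
--             if i >= len_A:
--                 return 0
--
--             if A[i] != B[j]:
--                 return 0
--
--     if j != len_B-1 or i != len_A-1:
--         return 0
--     return 1
-- ===== SOURCE B (Python) =====
-- def solve(A, B):
--     collapsed = B[:1] + ''.join(c for p, c in zip(B, B[1:]) if c != p)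
--     return 1 if collapsed == A else 0
-- ===== Notes on version B (the rewrite author's own statement) =====
-- stated objective: simpler
-- what changed: Replaces the interleaved index-tracking two-pointer walk (with leftover loop-variable checks) by building B's run-length-collapsed string via zip of B with its tail and comparing it to A as a whole.
import Mathlib
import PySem

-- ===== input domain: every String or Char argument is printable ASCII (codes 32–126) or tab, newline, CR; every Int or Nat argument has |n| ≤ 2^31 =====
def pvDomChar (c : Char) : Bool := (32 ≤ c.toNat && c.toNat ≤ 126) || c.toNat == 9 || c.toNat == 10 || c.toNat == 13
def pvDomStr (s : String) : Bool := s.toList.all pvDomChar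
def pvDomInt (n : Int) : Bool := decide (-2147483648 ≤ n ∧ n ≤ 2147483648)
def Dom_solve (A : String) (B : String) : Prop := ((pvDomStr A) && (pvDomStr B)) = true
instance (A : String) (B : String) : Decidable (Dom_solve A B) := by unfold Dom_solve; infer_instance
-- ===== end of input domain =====

-- B builds B's run-length-collapsed string (zip with tail) and compares it to A whole, instead of
-- A's interleaved two-pointer index walk; same cost, simpler decomposition.

-- ===== PORT A =====
-- A's for-loop over j in range(1, len(B)): state is the A-cursor i; returns none where the
-- Python loop body returns 0, otherwise the final i.
def solveLoopA (la lb : List Char) (j i : Nat) : Option Nat :=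
  if h : j < lb.length then
    if lb.getD j ' ' ≠ lb.getD (j - 1) ' ' then
      if i + 1 ≥ la.length then none
      else if la.getD (i + 1) ' ' ≠ lb.getD j ' ' then none
      else solveLoopA la lb (j + 1) (i + 1)
    else solveLoopA la lb (j + 1) i
  else some i
termination_by lb.length - j

def solve (A : String) (B : String) : Int :=
  let la := A.toList
  let lb := B.toList
  -- A[0] != B[0] (Python raises IndexError on empty A or B — excluded by Pre_solve; getD is only a totality guard)
  if la.getD 0 ' ' ≠ lb.getD 0 ' ' then 0
  else
    match solveLoopA la lb 1 0 with
    | none => 0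
    | some i =>
      -- leftover Python loop variable j after the for-loop
      let j := if lb.length > 1 then lb.length - 1 else 0
      if j ≠ lb.length - 1 ∨ i ≠ la.length - 1 then 0 else 1

-- ===== PORT B =====
def solve_alt (A : String) (B : String) : Int :=
  let lb := B.toList
  let collapsed := lb.take 1 ++ ((lb.zip lb.tail).filterMap (fun pc => if pc.2 ≠ pc.1 then some pc.2 else none))
  if collapsed = A.toList then 1 else 0

-- ===== PRECONDITION & SPEC =====
-- Pre_ excludes empty A or empty B, on which the Python A raises IndexError at A[0]/B[0].
def Pre_solve (A : String) (B : String) : Prop := A ≠ "" ∧ B ≠ ""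
instance (A : String) (B : String) : Decidable (Pre_solve A B) := by unfold Pre_solve; infer_instance
def pvWitness_solve : String × String := ("ab", "aabbb")

def Spec_solve (A : String) (B : String) (out : Int) : Prop := out = solve_alt A B
instance (A : String) (B : String) (out : Int) : Decidable (Spec_solve A B out) := by unfold Spec_solve; infer_instance

-- ===== CLAIM (what is proved, stated in full; the proofs are below) =====
def Claim_equal_solve : Prop := ∀ (A : String) (B : String), Dom_solve A B → Pre_solve A B → Spec_solve A B (solve A B)

-- ===== LEMMAS AND PROOFS =====

-- run-length collapse of `rest` given the previous character `prev`
def cf (prev : Char) : List Char → List Char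
  | [] => []
  | c :: t => if c ≠ prev then c :: cf c t else cf c t

theorem filterMap_zip_eq_cf (rest : List Char) : ∀ (prev : Char),
    (((prev :: rest).zip rest).filterMap (fun pc => if pc.2 ≠ pc.1 then some pc.2 else none))
      = cf prev rest := by
  induction rest with
  | nil => intro prev; rfl
  | cons c t ih =>
    intro prev
    simp only [List.zip_cons_cons, List.filterMap_cons, cf]
    by_cases h : c = prev
    · subst h
      simp only [ne_eq, not_true_eq_false, if_false]
      simpa using ih c
    · simp only [ne_eq, h, not_false_eq_true, if_pos]
      have := ih c
      simp only [ne_eq] at this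
      rw [this]

theorem loopA_eq (la lb : List Char) : ∀ (n j i : Nat), n = lb.length - j → 1 ≤ j → i < la.length →
    la.getD i ' ' = lb.getD (j - 1) ' ' →
    ((match solveLoopA la lb j i with
      | none => (0 : Int)
      | some i' => if i' ≠ la.length - 1 then 0 else 1)
     = if la.drop (i + 1) = cf (lb.getD (j - 1) ' ') (lb.drop j) then 1 else 0) := by
  intro n
  induction n with
  | zero =>
    intro j i hn hj hi hmatch
    have hjl : lb.length ≤ j := by omega
    rw [solveLoopA]
    rw [dif_neg (by omega : ¬ j < lb.length), List.drop_eq_nil_of_le hjl]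
    simp only [cf]
    by_cases h : la.drop (i + 1) = []
    · have : la.length ≤ i + 1 := List.drop_eq_nil_iff.mp h
      rw [if_pos h, if_neg (by omega : ¬ i ≠ la.length - 1)]
    · have : ¬ la.length ≤ i + 1 := fun hle => h (List.drop_eq_nil_of_le hle)
      rw [if_neg h, if_pos (by omega : i ≠ la.length - 1)]
  | succ n ih =>
    intro j i hn hj hi hmatch
    by_cases hjl : j < lb.length
    · have hdrop : lb.drop j = lb[j] :: lb.drop (j + 1) := List.drop_eq_getElem_cons hjl
      have hgj : lb.getD j ' ' = lb[j] := List.getD_eq_getElem lb ' ' hjl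
      rw [solveLoopA, dif_pos hjl]
      by_cases hcp : lb.getD j ' ' ≠ lb.getD (j - 1) ' '
      · -- new run: the A-cursor advances
        have hne : lb[j] ≠ lb.getD (j - 1) ' ' := hgj ▸ hcp
        rw [if_pos hcp, hdrop]
        simp only [cf, if_pos hne]
        by_cases hend : i + 1 ≥ la.length
        · -- A exhausted: Python returns 0; the collapsed tail is nonempty while A's tail is empty
          have hnil : la.drop (i + 1) = [] := List.drop_eq_nil_of_le hend
          rw [if_pos hend, hnil, if_neg (by simp)]
        · rw [if_neg hend]
          have hi1 : i + 1 < la.length := by omega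
          have hdropA : la.drop (i + 1) = la[i + 1] :: la.drop (i + 1 + 1) := List.drop_eq_getElem_cons hi1
          have hga : la.getD (i + 1) ' ' = la[i + 1] := List.getD_eq_getElem la ' ' hi1
          by_cases hmis : la.getD (i + 1) ' ' ≠ lb.getD j ' '
          · -- mismatch: Python returns 0; the head characters differ
            rw [if_pos hmis, hdropA, if_neg]
            intro hcons
            exact hmis (by rw [hga, hgj, ((List.cons.injEq _ _ _ _).mp hcons).1])
          · -- match: continue with cursor i+1; the previous char becomes lb[j]
            rw [if_neg hmis]
            have hmis' : la.getD (i + 1) ' ' = lb.getD j ' ' := not_not.mp hmis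
            have hrec := ih (j + 1) (i + 1) (by omega) (by omega) hi1
              (by rw [Nat.add_sub_cancel]; exact hmis')
            rw [Nat.add_sub_cancel] at hrec
            rw [hrec, hdropA]
            have hheads : la[i + 1] = lb[j] := by rw [← hga, ← hgj]; exact hmis'
            by_cases h2 : la.drop (i + 1 + 1) = cf (lb.getD j ' ') (lb.drop (j + 1))
            · rw [if_pos h2, if_pos (by rw [h2, hheads, hgj])]
            · rw [if_neg h2, if_neg]
              intro hcons
              exact h2 (by
                have := ((List.cons.injEq _ _ _ _).mp hcons).2
                rwa [← hgj] at this)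
      · -- same run: the cursor stays; the previous char for the next step is lb[j] = lb[j-1]
        rw [if_neg hcp]
        have hcp' : lb.getD j ' ' = lb.getD (j - 1) ' ' := not_not.mp hcp
        have hprev : lb.getD (j - 1) ' ' = lb[j] := by rw [← hcp', hgj]
        have hrec := ih (j + 1) i (by omega) (by omega) hi
          (by rw [Nat.add_sub_cancel, hcp']; exact hmatch)
        rw [Nat.add_sub_cancel, hgj] at hrec
        rw [hrec, hprev, hdrop]
        simp [cf]
    · -- j ≥ lb.length: the loop is over, as in the base case
      have hjl' : lb.length ≤ j := by omega
      rw [solveLoopA, dif_neg hjl, List.drop_eq_nil_of_le hjl']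
      simp only [cf]
      by_cases h : la.drop (i + 1) = []
      · have : la.length ≤ i + 1 := List.drop_eq_nil_iff.mp h
        rw [if_pos h, if_neg (by omega : ¬ i ≠ la.length - 1)]
      · have : ¬ la.length ≤ i + 1 := fun hle => h (List.drop_eq_nil_of_le hle)
        rw [if_neg h, if_pos (by omega : i ≠ la.length - 1)]

-- ===== VERDICT (by name: the statement is the Claim_ definition above) =====
theorem solve_spec : Claim_equal_solve := by
  intro A B _ hpre
  obtain ⟨hA, hB⟩ := hpre
  obtain ⟨a0, ta, hla⟩ : ∃ a0 ta, A.toList = a0 :: ta := by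
    cases h : A.toList with
    | nil => exact absurd (by rwa [← String.toList_eq_nil_iff]) hA
    | cons x xs => exact ⟨x, xs, rfl⟩
  obtain ⟨b0, tb, hlb⟩ : ∃ b0 tb, B.toList = b0 :: tb := by
    cases h : B.toList with
    | nil => exact absurd (by rwa [← String.toList_eq_nil_iff]) hB
    | cons x xs => exact ⟨x, xs, rfl⟩
  have hjf : (if (b0 :: tb).length > 1 then (b0 :: tb).length - 1 else 0) = (b0 :: tb).length - 1 := by
    by_cases h : (b0 :: tb).length > 1
    · rw [if_pos h]
    · rw [if_neg h]; simp only [List.length_cons] at h ⊢; omega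
  unfold Spec_solve solve solve_alt
  simp only [hla, hlb, List.tail_cons, filterMap_zip_eq_cf, List.getD_cons_zero,
    List.take_succ_cons, List.take_zero, List.cons_append, List.nil_append, hjf, ne_eq,
    not_true_eq_false, false_or, List.cons.injEq]
  by_cases h0 : a0 = b0
  · subst h0
    have hL := loopA_eq (a0 :: ta) (a0 :: tb) ((a0 :: tb).length - 1) 1 0 rfl le_rfl (by simp)
      (by simp)
    simp only [show (1 : Nat) - 1 = 0 from rfl, List.getD_cons_zero, List.drop_succ_cons,
      List.drop_zero] at hL
    simp only [not_true_eq_false, if_false, true_and]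
    rw [hL]
    by_cases hc : ta = cf a0 tb
    · rw [if_pos hc, if_pos hc.symm]
    · rw [if_neg hc, if_neg (fun h => hc h.symm)]
  · rw [if_pos (by simpa using h0), if_neg (by rintro ⟨h, -⟩; exact h0 h.symm)]
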